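-- pv_equiv track=rewrite | github.com/mr-internetix/mdd-maker | ipsos/dimensions/ddf.py | _split_varname_components
-- ===== SOURCE A (Python) =====
-- def _split_varname_components(variable_fullname):
--     """
--     This method splits a full VDAT variable/column name into its components
--
--     Args:
--         variable_fullname (str): The categorical variable (as it is in the mdd) that we want to split into components.
--
--     Returns:
--         The list of components.
--     """
--     tmp = variable_fullname.split(sep=".")
--     result = []
--     s = ""
--     for c in tmp:
--         s += c
--         if c.endswith("]"):
--             result.append(s)
--             s = ""
--         else:
--             s += "."
--     if s.endswith("."): s = s[:-1]
--     result.append(s)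
--
--     return result
-- ===== SOURCE B (Python) =====
-- def _split_varname_components(variable_fullname):
--     """Split a full VDAT variable/column name into its components.
--
--     A component ends at a ']' that is followed by '.' or by the end of the
--     name; the final element is whatever remains after the last component.
--     """
--     parts = []
--     start = 0
--     n = len(variable_fullname)
--     for i, ch in enumerate(variable_fullname):
--         if ch == "]" and (i + 1 == n or variable_fullname[i + 1] == "."):
--             parts.append(variable_fullname[start:i + 1])
--             start = i + 2
--     parts.append(variable_fullname[start:])
--     return parts
-- ===== Notes on version B (the rewrite author's own statement) =====
-- stated objective: simpler
-- what changed: Replaced A's split-on-'.' followed by a token loop that re-concatenates pieces (endswith checks, re-added dots, a final strip of the trailing dot) by a single indexed scan that records a cut after each ']' followed by '.' or end-of-name and emits components as slices of the original string.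
import Mathlib
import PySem

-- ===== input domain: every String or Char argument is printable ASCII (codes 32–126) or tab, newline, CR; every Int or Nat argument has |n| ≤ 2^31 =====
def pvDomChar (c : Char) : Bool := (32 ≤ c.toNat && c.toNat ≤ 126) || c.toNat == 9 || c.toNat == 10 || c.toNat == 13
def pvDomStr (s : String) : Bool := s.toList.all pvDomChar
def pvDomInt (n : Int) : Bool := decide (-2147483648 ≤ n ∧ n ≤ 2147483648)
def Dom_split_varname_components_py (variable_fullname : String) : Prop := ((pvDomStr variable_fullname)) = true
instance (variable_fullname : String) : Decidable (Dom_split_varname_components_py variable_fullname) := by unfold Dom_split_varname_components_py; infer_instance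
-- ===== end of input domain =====

-- B replaces A's split-on-'.'-then-regroup token loop by one indexed scan that
-- cuts after each ']' followed by '.' or end-of-name (objective: simpler).

-- ===== PORT A =====
-- for c in tmp: s += c; if c.endswith("]"): result.append(s); s = "" else: s += "."
def pvStepA (st : List (List Char) × List Char) (c : List Char) : List (List Char) × List Char :=
  let s' := st.2 ++ c
  if PySem.Chars.endswith c [']'] then (st.1 ++ [s'], []) else (st.1, s' ++ ['.'])

-- if s.endswith("."): s = s[:-1];  result.append(s)
def pvFinA (st : List (List Char) × List Char) : List (List Char) :=
  let s := if PySem.Chars.endswith st.2 ['.'] then PySem.Chars.slice st.2 none (some (-1)) else st.2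
  st.1 ++ [s]

def split_varname_components_py (variable_fullname : String) : List String :=
  let tmp := PySem.Chars.splitOn variable_fullname.toList ['.']
  (pvFinA (tmp.foldl pvStepA ([], []))).map String.ofList

-- ===== PORT B =====
-- if ch == "]" and (i + 1 == n or v[i+1] == "."): parts.append(v[start:i+1]); start = i + 2
-- (the v[i+1] lookup is short-circuit guarded in Python; pyGet? = some '.' is its exact total form)
def pvStepB (cs : List Char) (st : List (List Char) × Int) (p : Int × Char) :
    List (List Char) × Int :=
  if p.2 = ']' ∧ (p.1 + 1 = (cs.length : Int) ∨ PySem.List.pyGet? cs (p.1 + 1) = some '.') then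
    (st.1 ++ [PySem.List.slice cs (some st.2) (some (p.1 + 1))], p.1 + 2)
  else st

-- parts = []; start = 0; for i, ch in enumerate(v): …; parts.append(v[start:])
def split_varname_components_py_alt (variable_fullname : String) : List String :=
  let cs := variable_fullname.toList
  let st := (PySem.List.enumerate cs).foldl (pvStepB cs) ([], 0)
  ((st.1 ++ [PySem.List.slice cs (some st.2) none]).map String.ofList)

-- ===== PRECONDITION & SPEC =====
def Spec_split_varname_components_py (variable_fullname : String) (out : List String) : Prop := out = split_varname_components_py_alt variable_fullname
instance (variable_fullname : String) (out : List String) : Decidable (Spec_split_varname_components_py variable_fullname out) := by unfold Spec_split_varname_components_py; infer_instance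

-- ===== CLAIM (what is proved, stated in full; the proofs are below) =====
def Claim_equal_split_varname_components_py : Prop := ∀ (variable_fullname : String), Dom_split_varname_components_py variable_fullname → Spec_split_varname_components_py variable_fullname (split_varname_components_py variable_fullname)

-- ===== LEMMAS AND PROOFS =====

-- prepend x to the head component (proof-side normal form of both programs)
def pvConsH (x : List Char) : List (List Char) → List (List Char)
  | [] => [x]
  | h :: t => (x ++ h) :: t

-- the common specification: components cut after each ']' followed by '.' or end
def pvCut : List Char → List (List Char)
  | [] => [[]]
  | c :: rest =>
    if c = ']' ∧ (rest = [] ∨ rest.head? = some '.') then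
      [c] :: pvCut rest.tail
    else
      pvConsH [c] (pvCut rest)
termination_by l => l.length
decreasing_by
  · simp [List.length_tail]
  · simp

theorem pvCut_ne_nil (cs : List Char) : pvCut cs ≠ [] := by
  cases cs with
  | nil => simp [pvCut]
  | cons c rest =>
    rw [pvCut]
    split
    · simp
    · cases pvCut rest <;> simp [pvConsH]

theorem pvConsH_pvConsH (a b : List Char) (X : List (List Char)) :
    pvConsH a (pvConsH b X) = pvConsH (a ++ b) X := by
  cases X <;> simp [pvConsH]

theorem pvConsH_nil (X : List (List Char)) (h : X ≠ []) : pvConsH [] X = X := by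
  cases X with
  | nil => exact absurd rfl h
  | cons x t => simp [pvConsH]

-- simple structural version of splitting on '.'
def pvSplitDot : List Char → List (List Char)
  | [] => [[]]
  | c :: rest =>
    if c = '.' then [] :: pvSplitDot rest
    else match pvSplitDot rest with
      | [] => [[c]]
      | t :: ts => (c :: t) :: ts

theorem pvSplitDot_cons (c : Char) (rest : List Char) :
    pvSplitDot (c :: rest) =
      if c = '.' then [] :: pvSplitDot rest
      else match pvSplitDot rest with
        | [] => [[c]]
        | t :: ts => (c :: t) :: ts := rfl

theorem pvSplitDot_ne_nil (cs : List Char) : pvSplitDot cs ≠ [] := by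
  cases cs with
  | nil => simp [pvSplitDot]
  | cons c rest =>
    rw [pvSplitDot_cons]
    split
    · simp
    · split <;> simp

theorem pvEnds_nil (x : Char) : PySem.Chars.endswith [] [x] = false := by
  simp [PySem.Chars.endswith, List.isSuffixOf]

theorem pvEnds_concat (s : List Char) (c x : Char) :
    PySem.Chars.endswith (s ++ [c]) [x] = decide (c = x) := by
  simp [PySem.Chars.endswith, List.isSuffixOf, List.isPrefixOf]
  rcases eq_or_ne c x with h | h <;> simp [h]
  exact fun hx => absurd hx.symm h

theorem pvEnds_cons (c x : Char) (t : List Char) (ht : t ≠ []) :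
    PySem.Chars.endswith (c :: t) [x] = PySem.Chars.endswith t [x] := by
  rcases (List.eq_nil_or_concat t).resolve_left ht with ⟨t0, c0, rfl⟩
  simp only [List.concat_eq_append]
  rw [show c :: (t0 ++ [c0]) = (c :: t0) ++ [c0] by simp, pvEnds_concat, pvEnds_concat]

theorem pvGo_spec (fuel : Nat) : ∀ (l cur : List Char) (acc : List (List Char)), l.length < fuel →
    PySem.Chars.splitOn.go ['.'] fuel l cur acc =
      acc.reverse ++ (match pvSplitDot l with
        | [] => [cur.reverse]
        | t :: ts => (cur.reverse ++ t) :: ts) := by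
  induction fuel with
  | zero => intro l cur acc h; omega
  | succ f ih =>
    intro l cur acc h
    cases l with
    | nil =>
      rw [PySem.Chars.splitOn.go]
      simp [pvSplitDot]
      simp
    | cons c rest =>
      by_cases hc : c = '.'
      · subst hc
        have h1 : PySem.Chars.splitOn.go ['.'] (f + 1) ('.' :: rest) cur acc =
            PySem.Chars.splitOn.go ['.'] f rest [] (cur.reverse :: acc) := by
          rw [PySem.Chars.splitOn.go]
          simp [List.isPrefixOf]
        rw [h1, ih rest [] (cur.reverse :: acc) (by simp at h; omega)]
        rw [pvSplitDot_cons, if_pos rfl]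
        cases hsd : pvSplitDot rest with
        | nil => exact absurd hsd (pvSplitDot_ne_nil rest)
        | cons t ts => simp
      · have h1 : PySem.Chars.splitOn.go ['.'] (f + 1) (c :: rest) cur acc =
            PySem.Chars.splitOn.go ['.'] f rest (c :: cur) acc := by
          rw [PySem.Chars.splitOn.go]
          have hpre : List.isPrefixOf ['.'] (c :: rest) = false := by
            simp [List.isPrefixOf]
            intro hx; exact absurd hx.symm hc
          rw [hpre]
          simp
        rw [h1, ih rest (c :: cur) acc (by simp at h; omega)]
        rw [pvSplitDot_cons]
        simp only [if_neg hc]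
        cases hsd : pvSplitDot rest with
        | nil => exact absurd hsd (pvSplitDot_ne_nil rest)
        | cons t ts => simp

theorem pvSplitOn_eq (cs : List Char) : PySem.Chars.splitOn cs ['.'] = pvSplitDot cs := by
  show PySem.Chars.splitOn.go ['.'] (cs.length + 1) cs [] [] = _
  rw [pvGo_spec (cs.length + 1) cs [] [] (by omega)]
  cases hsd : pvSplitDot cs with
  | nil => exact absurd hsd (pvSplitDot_ne_nil cs)
  | cons t ts => simp

-- evaluation equations for pvCut, one per shape the induction meets
theorem pvCut_dot (rest : List Char) : pvCut ('.' :: rest) = pvConsH ['.'] (pvCut rest) := by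
  rw [pvCut]; simp

theorem pvCut_single (c : Char) : pvCut [c] = if c = ']' then [[c], []] else [[c]] := by
  rw [pvCut]
  by_cases hcb : c = ']' <;> simp [hcb, pvCut, pvConsH]

theorem pvCut_close_dot (rest : List Char) : pvCut (']' :: '.' :: rest) = [']'] :: pvCut rest := by
  rw [pvCut]; simp

theorem pvCut_other_dot (c : Char) (rest : List Char) (hcb : c ≠ ']') :
    pvCut (c :: '.' :: rest) = pvConsH [c] (pvCut ('.' :: rest)) := by
  rw [pvCut]; simp [hcb]

theorem pvCut_two (c d : Char) (rest : List Char) (hd : d ≠ '.') :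
    pvCut (c :: d :: rest) = pvConsH [c] (pvCut (d :: rest)) := by
  rw [pvCut]
  simp [hd]

-- A's token loop computes pvCut (with the pending prefix s prepended to the head)
theorem pvMainA (n : Nat) : ∀ (cs : List Char), cs.length ≤ n → ∀ (res : List (List Char)) (s : List Char),
    pvFinA (List.foldl pvStepA (res, s) (pvSplitDot cs)) = res ++ pvConsH s (pvCut cs) := by
  induction n with
  | zero =>
    intro cs hlen res s
    have hcs : cs = [] := by cases cs <;> simp_all
    subst hcs
    have hA : List.foldl pvStepA (res, s) (pvSplitDot []) = (res, s ++ ['.']) := by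
      simp [pvSplitDot, pvStepA, pvEnds_nil]
    rw [hA]
    simp [pvFinA, pvEnds_concat, PySem.Chars.slice_eq_listSlice, PySem.List.slice_to_neg_one,
      pvCut, pvConsH]
  | succ n ih =>
    intro cs hlen res s
    cases cs with
    | nil => exact ih [] (by simp) res s
    | cons c cs'
    => by_cases hc : c = '.'
       · subst hc
         have hA : pvSplitDot ('.' :: cs') = [] :: pvSplitDot cs' := by
           rw [pvSplitDot_cons]; simp
         have hstA : pvStepA (res, s) [] = (res, s ++ ['.']) := by
           simp [pvStepA, pvEnds_nil]
         rw [hA]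
         simp only [List.foldl, hstA]
         rw [ih cs' (by simp at hlen ⊢; omega) res (s ++ ['.']), pvCut_dot, pvConsH_pvConsH]
       · cases cs' with
         | nil =>
           have hA : pvSplitDot [c] = [[c]] := by
             rw [pvSplitDot_cons]; simp [pvSplitDot, hc]
           have hends : PySem.Chars.endswith [c] [']'] = decide (c = ']') := by
             rw [show [c] = ([] : List Char) ++ [c] by simp, pvEnds_concat]
           rw [hA, pvCut_single]
           by_cases hcb : c = ']'
           · subst hcb
             simp only [List.foldl, pvStepA, hends, decide_true, if_true]
             simp [pvFinA, pvEnds_nil, pvConsH]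
           · have hstA : pvStepA (res, s) [c] = (res, s ++ [c] ++ ['.']) := by
               simp [pvStepA, hends, hcb]
             simp only [List.foldl, hstA, if_neg hcb]
             have he : PySem.Chars.endswith (s ++ [c] ++ ['.']) ['.'] = true := by
               rw [pvEnds_concat]; decide
             simp only [pvFinA]
             rw [show s ++ [c] ++ ['.'] = s ++ [c, '.'] by simp] at he
             simp [he, PySem.Chars.slice_eq_listSlice, PySem.List.slice_to_neg_one, pvConsH]
         | cons d rest =>
           by_cases hd : d = '.'
           · subst hd
             have hA : pvSplitDot (c :: '.' :: rest) = [c] :: pvSplitDot rest := by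
               rw [pvSplitDot_cons, if_neg hc, pvSplitDot_cons]
               simp
             have hends : PySem.Chars.endswith [c] [']'] = decide (c = ']') := by
               rw [show [c] = ([] : List Char) ++ [c] by simp, pvEnds_concat]
             rw [hA]
             by_cases hcb : c = ']'
             · subst hcb
               have hstA : pvStepA (res, s) [']'] = (res ++ [s ++ [']']], []) := by
                 simp [pvStepA, hends]
               simp only [List.foldl, hstA]
               rw [ih rest (by simp at hlen ⊢; omega) (res ++ [s ++ [']']]) [], pvCut_close_dot,
                 pvConsH_nil _ (pvCut_ne_nil rest)]
               simp [pvConsH]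
             · have hstA : pvStepA (res, s) [c] = (res, s ++ [c] ++ ['.']) := by
                 simp [pvStepA, hends, hcb]
               simp only [List.foldl, hstA]
               rw [ih rest (by simp at hlen ⊢; omega) res (s ++ [c] ++ ['.']),
                 pvCut_other_dot c rest hcb, pvCut_dot, pvConsH_pvConsH, pvConsH_pvConsH]
           · have hrec : ∃ t ts, pvSplitDot (d :: rest) = (d :: t) :: ts := by
               rw [pvSplitDot_cons, if_neg hd]
               cases hsd : pvSplitDot rest with
               | nil => exact absurd hsd (pvSplitDot_ne_nil rest)
               | cons t ts => exact ⟨t, ts, rfl⟩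
             obtain ⟨t, ts, hdt⟩ := hrec
             have hA : pvSplitDot (c :: d :: rest) = (c :: d :: t) :: ts := by
               rw [pvSplitDot_cons, if_neg hc, hdt]
             have hstA : pvStepA (res, s) (c :: d :: t) = pvStepA (res, s ++ [c]) (d :: t) := by
               simp only [pvStepA, pvEnds_cons c ']' (d :: t) (by simp)]
               split <;> simp
             rw [hA]
             simp only [List.foldl, hstA]
             have hrest := ih (d :: rest) (by simp at hlen ⊢; omega) res (s ++ [c])
             rw [hdt] at hrest
             simp only [List.foldl] at hrest
             rw [hrest, pvCut_two c d rest hd, pvConsH_pvConsH]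

-- B's indexed scan computes pvCut as well
theorem pvMainB (n : Nat) : ∀ (cs l : List Char) (k : Nat), l = cs.drop k → l.length ≤ n →
    ∀ (parts : List (List Char)) (start : Nat), start ≤ k →
    (List.foldl (pvStepB cs) (parts, (start : Int)) (PySem.List.enumerate l (k : Int))).1 ++
      [PySem.List.slice cs
        (some (List.foldl (pvStepB cs) (parts, (start : Int))
          (PySem.List.enumerate l (k : Int))).2) none] =
      parts ++ pvConsH ((cs.drop start).take (k - start)) (pvCut l) := by
  induction n with
  | zero =>
    intro cs l k hl hlen parts start hs
    have hnil : l = [] := by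
      cases l with
      | nil => rfl
      | cons a t => simp at hlen
    subst hnil
    have hk : cs.length ≤ k := by
      have := congrArg List.length hl
      simp at this; omega
    simp only [PySem.List.enumerate_nil, List.foldl_nil, pvCut, pvConsH,
      PySem.List.slice_from_natCast]
    rw [List.take_of_length_le (by simp; omega)]
    simp
  | succ n ih =>
    intro cs l k hl hlen parts start hs
    cases l with
    | nil => exact ih cs [] k hl (by simp) parts start hs
    | cons c rest =>
      have hklen : k < cs.length := by
        by_contra hkl
        rw [List.drop_eq_nil_of_le (by omega)] at hl
        exact absurd hl.symm (by simp)
      have hck : cs[k]? = some c := by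
        rw [← List.head?_drop, ← hl]; rfl
      have hrest : rest = cs.drop (k + 1) := by
        have := congrArg List.tail hl
        simpa [List.tail_drop] using this
      have hrh : rest.head? = cs[k + 1]? := by
        rw [hrest, List.head?_drop]
      have henum : PySem.List.enumerate (c :: rest) (k : Int) =
          ((k : Int), c) :: PySem.List.enumerate rest ((k : Int) + 1) := by
        simp [PySem.List.enumerate_cons]
      -- the step's condition coincides with pvCut's
      have hcond : (c = ']' ∧ ((k : Int) + 1 = (cs.length : Int) ∨
            PySem.List.pyGet? cs ((k : Int) + 1) = some '.')) ↔
          (c = ']' ∧ (rest = [] ∨ rest.head? = some '.')) := by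
        constructor
        · rintro ⟨rfl, h⟩
          refine ⟨rfl, ?_⟩
          rcases h with h | h
          · left; rw [hrest]; apply List.drop_eq_nil_of_le; omega
          · right
            rw [show (k : Int) + 1 = ((k + 1 : Nat) : Int) by push_cast; ring,
              PySem.List.pyGet?_natCast] at h
            rw [hrh]; exact h
        · rintro ⟨rfl, h⟩
          refine ⟨rfl, ?_⟩
          rcases h with h | h
          · left
            rw [hrest] at h
            have h2 : cs.length ≤ k + 1 := by
              by_contra hc2
              exact absurd h (by simp; omega)
            have h3 : cs.length = k + 1 := by omega
            simp [h3]
          · right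
            rw [show (k : Int) + 1 = ((k + 1 : Nat) : Int) by push_cast; ring,
              PySem.List.pyGet?_natCast]
            rw [← hrh]; exact h
      have hseg : (cs.drop start).take (k + 1 - start) =
          (cs.drop start).take (k - start) ++ [c] := by
        rw [show k + 1 - start = (k - start) + 1 by omega, List.take_add_one]
        have h4 : (cs.drop start)[k - start]? = some c := by
          rw [List.getElem?_drop, show start + (k - start) = k by omega, hck]
        simp [h4]
      rw [henum]
      simp only [List.foldl_cons]
      by_cases hcut : c = ']' ∧ (rest = [] ∨ rest.head? = some '.')
      · have hstep : pvStepB cs (parts, (start : Int)) ((k : Int), c) =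
            (parts ++ [(cs.drop start).take (k + 1 - start)], ((k + 2 : Nat) : Int)) := by
          simp only [pvStepB]
          rw [if_pos (hcond.mpr hcut)]
          rw [show (k : Int) + 1 = ((k + 1 : Nat) : Int) by push_cast; ring,
            PySem.List.slice_natCast]
          refine Prod.ext ?_ ?_
          · rfl
          · show (k : Int) + 2 = ((k + 2 : Nat) : Int)
            push_cast; ring
        rw [hstep]
        rcases hcut with ⟨rfl, hr⟩
        cases rest with
        | nil =>
          simp only [PySem.List.enumerate_nil, List.foldl_nil]
          have hlen2 : cs.length = k + 1 := by
            have h1 := congrArg List.length hrest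
            simp at h1
            omega
          rw [PySem.List.slice_from_natCast,
            List.drop_eq_nil_of_le (show cs.length ≤ k + 2 by omega)]
          simp [pvCut_single, pvConsH, hseg]
        | cons d rest2 =>
          have hd : d = '.' := by
            rcases hr with h | h
            · exact absurd h (by simp)
            · simpa using h
          subst hd
          have henum2 : PySem.List.enumerate ('.' :: rest2) ((k : Int) + 1) =
              ((k : Int) + 1, '.') :: PySem.List.enumerate rest2 ((k : Int) + 2) := by
            simp [PySem.List.enumerate_cons]; ring_nf
          rw [henum2]
          simp only [List.foldl_cons]
          have hstep2 : pvStepB cs (parts ++ [(cs.drop start).take (k + 1 - start)],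
              ((k + 2 : Nat) : Int)) ((k : Int) + 1, '.') =
              (parts ++ [(cs.drop start).take (k + 1 - start)], ((k + 2 : Nat) : Int)) := by
            simp [pvStepB]
          rw [hstep2]
          have hrest2 : rest2 = cs.drop (k + 2) := by
            have h5 := congrArg List.tail hrest
            simpa [List.tail_drop] using h5
          have henum3 : PySem.List.enumerate rest2 ((k : Int) + 2) =
              PySem.List.enumerate rest2 (((k + 2 : Nat) : Int)) := by
            push_cast; ring_nf
          rw [henum3,
            ih cs rest2 (k + 2) hrest2 (by simp at hlen; omega)
              (parts ++ [(cs.drop start).take (k + 1 - start)]) (k + 2) (le_refl _),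
            pvCut_close_dot]
          rw [show (k + 2) - (k + 2) = 0 by omega]
          simp only [List.take_zero]
          rw [pvConsH_nil _ (pvCut_ne_nil rest2)]
          simp [pvConsH, hseg]
      · have hstep : pvStepB cs (parts, (start : Int)) ((k : Int), c) = (parts, (start : Int)) := by
          simp only [pvStepB]
          rw [if_neg (fun h => hcut (hcond.mp h))]
        rw [hstep]
        have henum2 : PySem.List.enumerate rest ((k : Int) + 1) =
            PySem.List.enumerate rest (((k + 1 : Nat) : Int)) := by
          push_cast; ring_nf
        rw [henum2,
          ih cs rest (k + 1) hrest (by simp at hlen; omega) parts start (by omega)]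
        rw [pvCut]
        simp only [if_neg hcut]
        rw [hseg, pvConsH_pvConsH]

-- ===== VERDICT (by name: the statement is the Claim_ definition above) =====
theorem split_varname_components_py_spec : Claim_equal_split_varname_components_py := by
  intro v _
  unfold Spec_split_varname_components_py
  unfold split_varname_components_py split_varname_components_py_alt
  rw [pvSplitOn_eq]
  have hB := pvMainB v.toList.length v.toList v.toList 0 (by simp) (le_refl _) [] 0 (le_refl _)
  show (pvFinA (List.foldl pvStepA ([], []) (pvSplitDot v.toList))).map String.ofList =
    ((List.foldl (pvStepB v.toList) ([], ((0 : Nat) : Int))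
        (PySem.List.enumerate v.toList ((0 : Nat) : Int))).1 ++
      [PySem.List.slice v.toList
        (some (List.foldl (pvStepB v.toList) ([], ((0 : Nat) : Int))
          (PySem.List.enumerate v.toList ((0 : Nat) : Int))).2) none]).map String.ofList
  rw [pvMainA v.toList.length v.toList (le_refl _) [] [], hB]
  simp
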